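-- pv_equiv track=rewrite | github.com/Kulak-Informatica/Python | Oefeningen/Toets2/Minister-President Rutte.py | tel_woorden
-- ===== SOURCE A (Python) =====
-- def tel_woorden(zin):
--     telling = 0
--     for i in range(len(zin)):
--         if zin[i] == ' ':
--             telling += 1
--         #elif zin[i] == '. ':
--             #telling += 1
--         elif zin[i] == '.':
--             telling += 1
--     return telling
-- ===== SOURCE B (Python) =====
-- def tel_woorden(zin):
--     return len(zin) - len(zin.replace(' ', '').replace('.', ''))
-- ===== Notes on version B (the rewrite author's own statement) =====
-- stated objective: faster
-- what changed: Counts by deletion instead of a per-character branch-and-increment loop: strip all spaces then all periods with str.replace and return the length difference.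
import Mathlib
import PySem

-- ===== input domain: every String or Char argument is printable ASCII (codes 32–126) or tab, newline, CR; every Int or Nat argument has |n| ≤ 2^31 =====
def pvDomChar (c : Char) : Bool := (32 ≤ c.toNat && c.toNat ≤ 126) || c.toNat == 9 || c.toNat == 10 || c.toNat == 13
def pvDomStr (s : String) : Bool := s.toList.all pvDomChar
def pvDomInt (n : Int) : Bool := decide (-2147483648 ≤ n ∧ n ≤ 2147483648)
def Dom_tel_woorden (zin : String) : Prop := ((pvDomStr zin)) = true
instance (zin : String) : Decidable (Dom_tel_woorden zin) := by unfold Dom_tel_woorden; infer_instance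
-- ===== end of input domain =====

-- B counts spaces and periods by deletion: length minus length after two str.replace passes, replacing A's per-character branch-and-increment loop (measured faster: C-level replace vs Python-level loop); return value only.


-- ===== PORT A =====
-- for i in range(len(zin)): branch on zin[i] (index always in range, so the pyGetD default is never used)
def tel_woorden (zin : String) : Int :=
  (PySem.List.pyRange 0 (zin.toList.length : Int) 1).foldl
    (fun telling i =>
      if PySem.List.pyGetD zin.toList i 'x' = ' ' then telling + 1
      else if PySem.List.pyGetD zin.toList i 'x' = '.' then telling + 1
      else telling) 0

-- ===== PORT B =====
-- len(zin) - len(zin.replace(' ', '').replace('.', ''))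
def tel_woorden_alt (zin : String) : Int :=
  (PySem.Str.len zin : Int) -
    (PySem.Str.len (PySem.Str.replace (PySem.Str.replace zin " " "") "." "") : Int)

-- ===== PRECONDITION & SPEC =====
def Spec_tel_woorden (zin : String) (out : Int) : Prop := out = tel_woorden_alt zin
instance (zin : String) (out : Int) : Decidable (Spec_tel_woorden zin out) := by unfold Spec_tel_woorden; infer_instance

-- ===== CLAIM (what is proved, stated in full; the proofs are below) =====
def Claim_equal_tel_woorden : Prop := ∀ (zin : String), Dom_tel_woorden zin → Spec_tel_woorden zin (tel_woorden zin)

-- ===== LEMMAS AND PROOFS =====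
-- A's loop counts spaces plus periods
lemma telA_count (l : List Char) (n : Int) :
    l.foldl (fun telling c =>
      if c = ' ' then telling + 1 else if c = '.' then telling + 1 else telling) n
    = n + l.count ' ' + l.count '.' := by
  induction l generalizing n with
  | nil => simp
  | cons c l ih =>
    by_cases h1 : c = ' '
    · subst h1; simp [List.foldl, ih]; ring
    · by_cases h2 : c = '.'
      · subst h2; simp [List.foldl, ih, h1]; ring
      · simp [List.foldl, ih, h1, h2]

-- replacing a single character by the empty string is filtering it out
lemma replace_go_single (d : Char) (fuel : Nat) (l acc : List Char) (h : l.length ≤ fuel) :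
    PySem.Chars.replace.go [d] [] fuel l acc = acc.reverse ++ l.filter (· ≠ d) := by
  induction fuel generalizing l acc with
  | zero =>
    have : l = [] := List.eq_nil_of_length_eq_zero (Nat.le_zero.mp h)
    subst this; simp [PySem.Chars.replace.go]
  | succ fuel ih =>
    cases l with
    | nil => simp [PySem.Chars.replace.go]
    | cons c t =>
      rw [PySem.Chars.replace.go]
      by_cases hc : d = c
      · subst hc
        rw [if_pos (by simp [List.isPrefixOf])]
        rw [ih _ _ (by simpa using Nat.le_of_succ_le_succ h)]
        simp
      · have hpre : [d].isPrefixOf (c :: t) = false := by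
          simp [List.isPrefixOf, hc]
        simp only [hpre, Bool.false_eq_true, if_false]
        rw [ih _ _ (by simpa using Nat.le_of_succ_le_succ h)]
        simp [Ne.symm hc]

lemma replace_single_empty (d : Char) (l : List Char) :
    PySem.Chars.replace l [d] [] = l.filter (· ≠ d) := by
  unfold PySem.Chars.replace
  simp [replace_go_single d l.length l [] (le_refl _)]

lemma filter_filter_len (l : List Char) :
    (l.filter (fun c => !(c == ' ') && !(c == '.'))).length + l.count ' ' + l.count '.' = l.length := by
  induction l with
  | nil => simp
  | cons c t ih =>
    simp only [List.filter_cons, List.count_cons, List.length_cons]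
    by_cases h1 : c = ' '
    · subst h1; simp; omega
    · by_cases h2 : c = '.'
      · subst h2; simp; omega
      · simp [h1, h2]; omega

lemma filter_merge (l : List Char) :
    ((l.filter (· ≠ ' ')).filter (· ≠ '.')).length = (l.filter (fun c => !(c == ' ') && !(c == '.'))).length := by
  simp only [List.filter_filter]
  congr 1
  apply List.filter_congr
  intro a _
  by_cases h1 : a = ' ' <;> by_cases h2 : a = '.' <;> simp [h1, h2]

-- ===== VERDICT (by name: the statement is the Claim_ definition above) =====
theorem tel_woorden_spec : Claim_equal_tel_woorden := by
  intro zin _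
  unfold Spec_tel_woorden tel_woorden tel_woorden_alt
  rw [PySem.List.foldl_pyRange_zero_pyGetD' zin.toList 'x'
    (fun telling c => if c = ' ' then telling + 1 else if c = '.' then telling + 1 else telling) 0]
  rw [telA_count]
  simp only [PySem.Str.len_eq, PySem.Str.toList_replace]
  have h2 : PySem.Chars.replace (PySem.Chars.replace zin.toList " ".toList "".toList) ".".toList "".toList
      = (zin.toList.filter (· ≠ ' ')).filter (· ≠ '.') := by
    simp [replace_single_empty]
  rw [h2]
  have hm := filter_merge zin.toList
  have hk := filter_filter_len zin.toList
  omega
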